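-- pv_equiv track=rewrite | github.com/kkr010128/codebert | problem074/problem074_9.py | ret
-- ===== SOURCE A (Python) =====
-- def ret(a):
--     c=[None]*(len(a)-1)
--     if len(a)==1:
--         return a[0]
--     elif len(a)==0:
--         return 0
--     for i in range(1,len(a)):
--         c[i-1]=abs(a[i]-a[i-1])
--     return ret(c)
-- ===== SOURCE B (Python) =====
-- def ret(a):
--     a = list(a)
--     while len(a) > 1:
--         a = [abs(a[i] - a[i - 1]) for i in range(1, len(a))]
--     return a[0] if a else 0
-- ===== Notes on version B (the rewrite author's own statement) =====
-- stated objective: idiomatic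
-- what changed: Recursion with a preallocated index-filled scratch array replaced by an iterative while-loop rebuilding the list with a comprehension over adjacent pairs, with the empty/singleton cases falling out of the loop condition.
import Mathlib
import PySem

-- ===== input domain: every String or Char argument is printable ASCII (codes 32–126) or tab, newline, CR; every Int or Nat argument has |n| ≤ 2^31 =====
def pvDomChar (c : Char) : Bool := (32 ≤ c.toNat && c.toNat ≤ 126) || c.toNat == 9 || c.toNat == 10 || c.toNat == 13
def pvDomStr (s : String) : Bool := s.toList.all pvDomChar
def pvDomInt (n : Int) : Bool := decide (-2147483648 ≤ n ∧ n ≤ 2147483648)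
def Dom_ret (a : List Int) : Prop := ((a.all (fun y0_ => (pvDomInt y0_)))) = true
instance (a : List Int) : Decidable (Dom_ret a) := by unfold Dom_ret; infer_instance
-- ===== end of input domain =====

-- B replaces A's recursion over a preallocated index-filled scratch array by an
-- iterative while-loop rebuilding the list from adjacent pairs (idiomatic; same behaviour).

-- ===== PORT A =====
def ret (a : List Int) : Int :=
  -- c = [None]*(len(a)-1) is a scratch array filled by the index loop; the filled
  -- array is the map of |a[i]-a[i-1]| over range(1, len(a)).
  if a.length = 1 then PySem.List.pyGetD a 0 0
  else if a.length = 0 then 0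
  else ret ((PySem.List.pyRange 1 (a.length : Int) 1).map
             fun i => |PySem.List.pyGetD a i 0 - PySem.List.pyGetD a (i - 1) 0|)
termination_by a.length
decreasing_by
  simp [PySem.List.length_pyRange_one]
  omega

-- ===== PORT B =====
-- while len(a) > 1: a = [abs(a[i]-a[i-1]) for i in range(1,len(a))]
-- the comprehension over adjacent pairs is zipWith over a and its tail
def retLoop (a : List Int) : List Int :=
  if a.length > 1 then retLoop (List.zipWith (fun p c => |c - p|) a a.tail) else a
termination_by a.length
decreasing_by
  simp [List.length_zipWith, List.length_tail]
  omega

def ret_alt (a : List Int) : Int :=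
  match retLoop a with
  | [] => 0
  | x :: _ => x

-- ===== PRECONDITION & SPEC =====
def Spec_ret (a : List Int) (out : Int) : Prop := out = ret_alt a
instance (a : List Int) (out : Int) : Decidable (Spec_ret a out) := by unfold Spec_ret; infer_instance

-- ===== CLAIM (what is proved, stated in full; the proofs are below) =====
def Claim_equal_ret : Prop := ∀ (a : List Int), Dom_ret a → Spec_ret a (ret a)

-- ===== LEMMAS AND PROOFS =====

-- A's filled scratch array equals B's adjacent-pair comprehension
theorem diffs_eq (a : List Int) :
    (PySem.List.pyRange 1 (a.length : Int) 1).map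
      (fun i => |PySem.List.pyGetD a i 0 - PySem.List.pyGetD a (i - 1) 0|)
    = List.zipWith (fun p c => |c - p|) a a.tail := by
  apply List.ext_getElem
  · simp [PySem.List.length_pyRange_one, List.length_zipWith, List.length_tail]
  · intro k h1 h2
    have hlen : k < a.length - 1 := by
      simpa [PySem.List.length_pyRange_one] using h1
    simp only [List.getElem_map, PySem.List.getElem_pyRange_one, List.getElem_zipWith]
    rw [PySem.List.pyGetD_eq_getElem _ _ (by omega) (by omega),
        PySem.List.pyGetD_eq_getElem _ _ (by omega) (by omega)]
    have h0 : ((1 : Int) + (k : Int)).toNat = k + 1 := by omega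
    have h1' : ((1 : Int) + (k : Int) - 1).toNat = k := by omega
    simp only [List.getElem_tail, h0, h1']

theorem retLoop_of_gt (a : List Int) (h : 1 < a.length) :
    retLoop a = retLoop (List.zipWith (fun p c => |c - p|) a a.tail) := by
  rw [retLoop]
  simp [h]

theorem ret_eq_alt (n : Nat) : ∀ (a : List Int), a.length = n → ret a = ret_alt a := by
  induction n using Nat.strong_induction_on with
  | _ n ih =>
    intro a hlen
    match n, a, hlen with
    | 0, a, hlen =>
      have ha : a = [] := List.length_eq_zero_iff.mp hlen
      subst ha
      rw [ret, ret_alt, retLoop]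
      simp
    | 1, a, hlen =>
      match a, hlen with
      | [x], _ =>
        rw [ret, ret_alt, retLoop]
        simp [PySem.List.pyGetD_zero_cons]
    | (m + 2), a, hlen =>
      have h2 : 1 < a.length := by omega
      rw [ret]
      simp only [show a.length ≠ 1 by omega, show a.length ≠ 0 by omega, if_false,
        diffs_eq]
      have hd : (List.zipWith (fun p c => |c - p|) a a.tail).length = m + 1 := by
          simp [List.length_zipWith, List.length_tail]; omega
      rw [ih (m + 1) (by omega) _ hd]
      unfold ret_alt
      rw [retLoop_of_gt a h2]

-- ===== VERDICT (by name: the statement is the Claim_ definition above) =====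
theorem ret_spec : Claim_equal_ret := by
  intro a _
  unfold Spec_ret
  exact ret_eq_alt a.length a rfl
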